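-- pv_equiv track=rewrite | github.com/TheNewThinkTank/advent-of-code | 2015/day_2/gift_paper.py | get_2_smallest_dims
-- ===== SOURCE A (Python) =====
-- def get_2_smallest_dims(present):
--     min_items = min(present.items(), key=lambda x: x[1])
--     second_min_items = min((item
--                             for item in present.items()
--                             if item != min_items),
--                             key=lambda x: x[1]
--                             )
--     return min_items, second_min_items
-- ===== SOURCE B (Python) =====
-- def get_2_smallest_dims(present):
--     first, second = sorted(present.items(), key=lambda x: x[1])[:2]
--     return first, second
-- ===== Notes on version B (the rewrite author's own statement) =====
-- stated objective: simpler
-- what changed: Replaced A's two min() passes (second over a filtered generator) by one stable sort by value followed by unpacking the first two items; stability makes the first two sorted items coincide with A's first-occurring minimum and the minimum of the rest.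
import Mathlib
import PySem

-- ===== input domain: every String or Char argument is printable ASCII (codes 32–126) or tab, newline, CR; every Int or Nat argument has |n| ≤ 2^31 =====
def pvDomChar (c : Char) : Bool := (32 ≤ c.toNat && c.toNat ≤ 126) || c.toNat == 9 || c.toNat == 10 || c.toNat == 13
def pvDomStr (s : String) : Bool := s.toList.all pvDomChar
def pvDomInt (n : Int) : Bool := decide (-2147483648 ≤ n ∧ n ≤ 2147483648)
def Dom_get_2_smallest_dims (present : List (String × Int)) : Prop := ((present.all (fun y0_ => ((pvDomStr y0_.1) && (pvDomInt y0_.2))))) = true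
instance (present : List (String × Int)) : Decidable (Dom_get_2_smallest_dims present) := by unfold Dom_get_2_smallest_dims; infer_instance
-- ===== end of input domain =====

-- B replaces A's two min() passes with one stable sort by value and unpacking the
-- first two items (objective: simpler).

-- ===== PORT A =====
-- min() over an empty iterable raises ValueError; those inputs are excluded by Pre_.
def get_2_smallest_dims (present : List (String × Int)) : (String × Int) × (String × Int) :=
  match PySem.List.min? present (fun x => x.2) with
  | none => (("", 0), ("", 0))      -- min() raises ValueError here (present empty); outside Pre_
  | some min_items =>
    match PySem.List.min? (present.filter (fun item => item != min_items)) (fun x => x.2) with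
    | none => (("", 0), ("", 0))    -- second min() raises ValueError here; outside Pre_
    | some second_min_items => (min_items, second_min_items)

-- ===== PORT B =====
-- sorted(...)[:2] then unpacking into two names; unpacking a list of length ≠ 2
-- raises ValueError, those inputs are outside Pre_.
def get_2_smallest_dims_alt (present : List (String × Int)) : (String × Int) × (String × Int) :=
  match PySem.List.slice (PySem.List.sorted present (fun x => x.2) false) none (some 2) with
  | [first, second] => (first, second)
  | _ => (("", 0), ("", 0))         -- unpacking raises ValueError here; outside Pre_

-- ===== PRECONDITION & SPEC =====
-- The Python argument is a dict, so keys are distinct by construction; the length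
-- bound excludes exactly the inputs on which both programs raise ValueError.
def Pre_get_2_smallest_dims (present : List (String × Int)) : Prop :=
  (present.map Prod.fst).Nodup ∧ 2 ≤ present.length
instance (present : List (String × Int)) : Decidable (Pre_get_2_smallest_dims present) := by
  unfold Pre_get_2_smallest_dims; infer_instance

def pvWitness_get_2_smallest_dims : (List (String × Int)) := [("a", 3), ("b", 1), ("c", 2)]

def Spec_get_2_smallest_dims (present : List (String × Int)) (out : (String × Int) × (String × Int)) : Prop := out = get_2_smallest_dims_alt present
instance (present : List (String × Int)) (out : (String × Int) × (String × Int)) : Decidable (Spec_get_2_smallest_dims present out) := by unfold Spec_get_2_smallest_dims; infer_instance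

-- ===== CLAIM (what is proved, stated in full; the proofs are below) =====
def Claim_equal_get_2_smallest_dims : Prop := ∀ (present : List (String × Int)), Dom_get_2_smallest_dims present → Pre_get_2_smallest_dims present → Spec_get_2_smallest_dims present (get_2_smallest_dims present)

-- ===== LEMMAS AND PROOFS =====

-- sorted over a snoc: the left fold peels the last element.
theorem sorted_snoc (xs : List (String × Int)) (x : String × Int) :
    PySem.List.sorted (xs ++ [x]) (fun y => y.2) false
      = PySem.List.insertBy (fun a b => decide ((a : String × Int).2 < b.2)) x
          (PySem.List.sorted xs (fun y => y.2) false) := by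
  simp [PySem.List.sorted, List.foldl_append]

theorem min?_snoc (xs : List (String × Int)) (x : String × Int) :
    PySem.List.min? (xs ++ [x]) (fun y => y.2)
      = match PySem.List.min? xs (fun y => y.2) with
        | none => some x
        | some m => if x.2 < m.2 then some x else some m := by
  cases h : PySem.List.min? xs (fun y => y.2) with
  | none =>
    simp only [PySem.List.min?] at h ⊢
    rw [List.foldl_append, List.foldl, List.foldl, h]
  | some m =>
    simp only [PySem.List.min?] at h ⊢
    rw [List.foldl_append, List.foldl, List.foldl, h]

-- head of the stable insertion sort = Python's min (first extremal element).
theorem head?_sorted_eq_min? (xs : List (String × Int)) :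
    (PySem.List.sorted xs (fun y => y.2) false).head? = PySem.List.min? xs (fun y => y.2) := by
  induction xs using List.reverseRecOn with
  | nil => simp [PySem.List.sorted, PySem.List.min?]
  | append_singleton xs x ih =>
    rw [sorted_snoc, min?_snoc, ← ih]
    cases h : PySem.List.sorted xs (fun y => y.2) false with
    | nil => simp [PySem.List.insertBy]
    | cons y ys =>
      by_cases hlt : x.2 < y.2 <;> simp [PySem.List.insertBy, hlt]

-- filtering commutes with insertion into a key-sorted list.
theorem filter_insertBy (p : String × Int → Bool) (x : String × Int) :
    ∀ (s : List (String × Int)), s.Pairwise (fun a b => a.2 ≤ b.2) →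
    (PySem.List.insertBy (fun a b => decide ((a : String × Int).2 < b.2)) x s).filter p
      = if p x then PySem.List.insertBy (fun a b => decide ((a : String × Int).2 < b.2)) x (s.filter p)
        else s.filter p := by
  intro s
  induction s with
  | nil => intro _; cases hpx : p x <;> simp [PySem.List.insertBy, hpx]
  | cons y ys ih =>
    intro hs
    have hy : ∀ z ∈ ys, y.2 ≤ z.2 := fun z hz => (List.pairwise_cons.mp hs).1 z hz
    have hys : ys.Pairwise (fun a b => a.2 ≤ b.2) := (List.pairwise_cons.mp hs).2
    have ih' := ih hys
    by_cases hlt : x.2 < y.2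
    · -- x goes before y; every element of ys also has key ≥ y.2 > x.2
      cases hpy : p y
      · -- y dropped: on the RHS x must still come first in filter p ys
        have hfront : PySem.List.insertBy (fun a b => decide ((a : String × Int).2 < b.2)) x (ys.filter p)
            = x :: ys.filter p := by
          cases hf : ys.filter p with
          | nil => simp [PySem.List.insertBy]
          | cons z zs =>
            have hzmem : z ∈ ys := (List.mem_filter.mp (hf ▸ List.mem_cons_self ..)).1
            have : x.2 < z.2 := lt_of_lt_of_le hlt (hy z hzmem)
            simp [PySem.List.insertBy, this]
        cases hpx : p x <;>
          simp_all [PySem.List.insertBy, hlt, hpy, hpx, hfront]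
      · cases hpx : p x <;>
          simp [PySem.List.insertBy, hlt, hpy, hpx]
    · -- x goes after y
      cases hpy : p y <;> cases hpx : p x <;>
        simp [PySem.List.insertBy, hlt, hpy, hpx, ih']

-- stable sort commutes with filtering.
theorem filter_sorted (p : String × Int → Bool) (xs : List (String × Int)) :
    (PySem.List.sorted xs (fun y => y.2) false).filter p
      = PySem.List.sorted (xs.filter p) (fun y => y.2) false := by
  induction xs using List.reverseRecOn with
  | nil => simp [PySem.List.sorted]
  | append_singleton xs x ih =>
    have hpw : (PySem.List.sorted xs (fun y => y.2) false).Pairwise (fun a b => a.2 ≤ b.2) :=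
      PySem.List.sorted_pairwise ..
    rw [sorted_snoc, filter_insertBy p x _ hpw, List.filter_append, ih]
    cases hpx : p x <;> simp [hpx, PySem.List.sorted]

-- ===== VERDICT (by name: the statement is the Claim_ definition above) =====
theorem get_2_smallest_dims_spec : Claim_equal_get_2_smallest_dims := by
  intro present _ hpre
  obtain ⟨hkeys, hlen⟩ := hpre
  have hnodup : present.Nodup := hkeys.of_map
  -- the sorted list has at least two elements
  have hslen : 2 ≤ (PySem.List.sorted present (fun y => y.2) false).length := by
    rw [PySem.List.length_sorted]; exact hlen
  obtain ⟨a, b, t, hs⟩ : ∃ a b t, PySem.List.sorted present (fun y => y.2) false = a :: b :: t := by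
    cases h : PySem.List.sorted present (fun y => y.2) false with
    | nil => rw [h] at hslen; simp at hslen
    | cons a rest =>
      cases rest with
      | nil => rw [h] at hslen; simp at hslen
      | cons b t => exact ⟨a, b, t, rfl⟩
  have hsnodup : (a :: b :: t).Nodup := hs ▸ (PySem.List.sorted_perm ..).nodup_iff.mpr hnodup
  have hba : ¬ (b = a) := fun h => (List.nodup_cons.mp hsnodup).1 (h ▸ List.mem_cons_self ..)
  have hmin : PySem.List.min? present (fun y => y.2) = some a := by
    rw [← head?_sorted_eq_min?, hs]; rfl
  have hfil : (a :: b :: t).filter (fun item => item != a)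
      = b :: t.filter (fun item => item != a) := by
    simp [hba]
  have hmin2 : PySem.List.min? (present.filter (fun item => item != a)) (fun y => y.2) = some b := by
    rw [← head?_sorted_eq_min?, ← filter_sorted, hs, hfil]; rfl
  show _ = get_2_smallest_dims_alt present
  simp only [get_2_smallest_dims, get_2_smallest_dims_alt, hmin, hmin2, hs,
    PySem.List.slice, PySem.List.clampIdx]
  rfl
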